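-- pv_equiv track=rewrite | github.com/hyeona04/aiproject_level0 | level0/caesar_menu_beginner.py | decrypt_double
-- ===== SOURCE A (Python) =====
-- ALPHABET = "abcdefghijklmnopqrstuvwxyz"
--
-- ALPHABET_UP = ALPHABET.upper()
--
-- def make_shifted_alphabet(shift: int):
--     """
--     1차: 시저 우측 shift 적용된 대문자 알파벳열 생성
--     예) shift=3 → D E F ... Z A B C
--     """
--     return [ALPHABET_UP[(i + shift) % 26] for i in range(26)]
--
-- def decrypt_stage1(ct1: str, shift: int) -> str:
--     """1차 복원: 시저(-shift) → 소문자"""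
--     out = []
--     for ch in ct1:
--         if ch == " ":
--             out.append(" ")
--         else:
--             i = ALPHABET.index(ch.lower())
--             out.append(ALPHABET[(i - shift) % 26])
--     return "".join(out)
--
-- def make_stage2_maps(shift: int):
--     """
--     2차 치환용 매핑(딕셔너리) 준비
--     shifted[i] → reversed_shifted[i] (정방향)
--     reversed_shifted[i] → shifted[i] (역방향)
--     """
--     shifted = make_shifted_alphabet(shift)
--     reversed_shifted = list(reversed(shifted))
--     forward = {shifted[i]: reversed_shifted[i] for i in range(26)}
--     backward = {reversed_shifted[i]: shifted[i] for i in range(26)}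
--     return forward, backward
--
-- def decrypt_double(ct2: str, shift: int = 3) -> str:
--     """최종 복호화: 2차 역치환 복원 → 1차 시저 복원"""
--     _, backward = make_stage2_maps(shift)
--     # 2차 역치환으로 1차 암호문 복원
--     ct1 = []
--     for ch in ct2:
--         if ch == " ":
--             ct1.append(" ")
--         else:
--             ct1.append(backward[ch])
--     # 1차 시저 복원
--     return decrypt_stage1("".join(ct1), shift)
-- ===== SOURCE B (Python) =====
-- def decrypt_double(ct2: str, shift: int = 3) -> str:
--     """One combined table, one pass: the composition of the stage-2 inverse
--     substitution and the stage-1 Caesar restore maps the uppercase letter of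
--     alphabet index c to the lowercase letter of index (25 + shift - c) % 26."""
--     table = {chr(65 + c): chr(97 + (25 + shift - c) % 26) for c in range(26)}
--     out = []
--     for ch in ct2:
--         out.append(' ' if ch == ' ' else table[ch])
--     return ''.join(out)
-- ===== Notes on version B (the rewrite author's own statement) =====
-- stated objective: simpler
-- what changed: A builds a shifted alphabet, a reversed copy and two 26-entry substitution dicts and then makes two passes (stage-2 inverse substitution producing an intermediate string, then a stage-1 Caesar pass with a linear alphabet .index scan per character); B precomputes the single composed mapping c -> (25+shift-c)%26 as one 26-entry dict and decrypts in one pass with one lookup per character.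
import Mathlib
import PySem

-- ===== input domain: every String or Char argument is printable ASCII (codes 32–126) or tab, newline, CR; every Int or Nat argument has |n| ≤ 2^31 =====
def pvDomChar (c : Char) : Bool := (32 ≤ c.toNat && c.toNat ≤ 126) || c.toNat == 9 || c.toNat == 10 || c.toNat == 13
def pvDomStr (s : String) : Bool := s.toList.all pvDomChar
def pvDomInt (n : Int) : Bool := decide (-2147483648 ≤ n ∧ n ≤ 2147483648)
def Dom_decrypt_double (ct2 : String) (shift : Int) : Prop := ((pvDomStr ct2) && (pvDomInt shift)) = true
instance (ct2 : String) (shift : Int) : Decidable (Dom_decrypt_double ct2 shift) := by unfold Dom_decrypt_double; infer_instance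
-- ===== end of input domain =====

-- B replaces A's two substitution dicts and two decryption passes by one composed
-- 26-entry table and a single pass (objective: simpler; same O(n) cost).

-- ===== PORT A =====
def pvALPHABET : List Char := "abcdefghijklmnopqrstuvwxyz".toList

def pvALPHABET_UP : List Char := PySem.Chars.upper pvALPHABET

def make_shifted_alphabet (shift : Int) : List Char :=
  -- index (i+shift)%26 is provably in range for the 26-letter list, so pyGetD is exact here
  (PySem.List.pyRange 0 26 1).map
    (fun i => PySem.List.pyGetD pvALPHABET_UP (PySem.Int.mod (i + shift) 26) ' ')

-- loop body of decrypt_stage1 (ALPHABET.index raises ValueError when the char is not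
-- found; that case — index? = none, defaulted to 0 — is unreachable under Pre_)
def stage1Char (shift : Int) (ch : Char) : Char :=
  if ch = ' ' then ' '
  else
    let i : Int := ((PySem.List.index? pvALPHABET (PySem.Chars.lowerChar ch)).getD 0 : Nat)
    PySem.List.pyGetD pvALPHABET (PySem.Int.mod (i - shift) 26) ' '

def decrypt_stage1 (ct1 : String) (shift : Int) : String :=
  String.ofList (ct1.toList.map (stage1Char shift))

def make_stage2_maps (shift : Int) : PySem.Dict Char Char × PySem.Dict Char Char :=
  let shifted := make_shifted_alphabet shift
  let reversed_shifted := shifted.reverse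
  let forward := (PySem.List.pyRange 0 26 1).foldl
    (fun d i => d.insert (PySem.List.pyGetD shifted i ' ')
                         (PySem.List.pyGetD reversed_shifted i ' ')) PySem.Dict.empty
  let backward := (PySem.List.pyRange 0 26 1).foldl
    (fun d i => d.insert (PySem.List.pyGetD reversed_shifted i ' ')
                         (PySem.List.pyGetD shifted i ' ')) PySem.Dict.empty
  (forward, backward)

-- loop body of decrypt_double (backward[ch] raises KeyError on a missing key;
-- that case — get? = none, defaulted to ' ' — is excluded by Pre_)
def stage2Char (backward : PySem.Dict Char Char) (ch : Char) : Char :=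
  if ch = ' ' then ' ' else (backward.get? ch).getD ' '

def decrypt_double (ct2 : String) (shift : Int) : String :=
  let backward := (make_stage2_maps shift).2
  let ct1 := String.ofList (ct2.toList.map (stage2Char backward))
  decrypt_stage1 ct1 shift

-- ===== PORT B =====
def altTable (shift : Int) : PySem.Dict Char Char :=
  (PySem.List.pyRange 0 26 1).foldl
    (fun d c => d.insert (Char.ofNat (65 + c).toNat)
                         (Char.ofNat (97 + PySem.Int.mod (25 + shift - c) 26).toNat))
    PySem.Dict.empty

-- loop body of B (table[ch] raises KeyError on a missing key; excluded by Pre_)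
def altChar (table : PySem.Dict Char Char) (ch : Char) : Char :=
  if ch = ' ' then ' ' else (table.get? ch).getD ' '

def decrypt_double_alt (ct2 : String) (shift : Int) : String :=
  String.ofList (ct2.toList.map (altChar (altTable shift)))

-- ===== PRECONDITION & SPEC =====
-- Pre_ excludes exactly the inputs on which A raises KeyError: any character that is
-- neither a space nor an uppercase letter (B raises KeyError there as well).
def Pre_decrypt_double (ct2 : String) (shift : Int) : Prop :=
  (ct2.toList.all (fun ch => ch == ' ' || ('A' ≤ ch && ch ≤ 'Z'))) = true
instance (ct2 : String) (shift : Int) : Decidable (Pre_decrypt_double ct2 shift) := by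
  unfold Pre_decrypt_double; infer_instance

def pvWitness_decrypt_double : String × Int := ("KHOOR ZRUOG", 3)

def Spec_decrypt_double (ct2 : String) (shift : Int) (out : String) : Prop := out = decrypt_double_alt ct2 shift
instance (ct2 : String) (shift : Int) (out : String) : Decidable (Spec_decrypt_double ct2 shift out) := by unfold Spec_decrypt_double; infer_instance

-- ===== CLAIM (what is proved, stated in full; the proofs are below) =====
def Claim_equal_decrypt_double : Prop := ∀ (ct2 : String) (shift : Int), Dom_decrypt_double ct2 shift → Pre_decrypt_double ct2 shift → Spec_decrypt_double ct2 shift (decrypt_double ct2 shift)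

-- ===== LEMMAS AND PROOFS =====

theorem mod26_emod (a : Int) : PySem.Int.mod a 26 = a % 26 :=
  PySem.Int.mod_eq_emod_of_pos (by norm_num)

-- small facts about the 26 letters, by evaluation
theorem lower_getD : ∀ m ∈ List.range 26, pvALPHABET.getD m ' ' = Char.ofNat (97 + m) := by
  decide

theorem upper_getD : ∀ m ∈ List.range 26, pvALPHABET_UP.getD m ' ' = Char.ofNat (65 + m) := by
  decide

theorem lowerChar_letter : ∀ m ∈ List.range 26,
    PySem.Chars.lowerChar (Char.ofNat (65 + m)) = Char.ofNat (97 + m) := by decide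

theorem index_letter : ∀ m ∈ List.range 26,
    PySem.List.index? pvALPHABET (Char.ofNat (97 + m)) = some m := by decide

theorem letter_ne_space : ∀ m ∈ List.range 26, Char.ofNat (65 + m) ≠ ' ' := by decide

theorem letter_inj : ∀ a ∈ List.range 26, ∀ b ∈ List.range 26,
    Char.ofNat (65 + a) = Char.ofNat (65 + b) → a = b := by decide

-- the shifted alphabet, element by element
theorem shifted_getD (shift j : Int) (h0 : 0 ≤ j) (h1 : j < 26) :
    PySem.List.pyGetD (make_shifted_alphabet shift) j ' '
      = Char.ofNat (65 + ((j + shift) % 26).toNat) := by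
  unfold make_shifted_alphabet
  rw [PySem.List.pyGetD_map_pyRange_of_nonneg _ 26 j ' ' h0 h1, mod26_emod]
  rw [show (j + shift) % 26 = (((j + shift) % 26).toNat : Int) by omega]
  rw [PySem.List.pyGetD_natCast]
  exact upper_getD _ (by simp only [List.mem_range]; omega)

theorem shifted_length (shift : Int) : (make_shifted_alphabet shift).length = 26 := by
  unfold make_shifted_alphabet
  rw [List.length_map, PySem.List.length_pyRange_one]
  decide

theorem shifted_getElem (shift : Int) (t : Nat) (ht : t < 26) :
    (make_shifted_alphabet shift)[t]'(by rw [shifted_length]; exact ht)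
      = Char.ofNat (65 + (((t : Int) + shift) % 26).toNat) := by
  have h := shifted_getD shift t (by omega) (by exact_mod_cast ht)
  rw [PySem.List.pyGetD_natCast, List.getD_eq_getElem _ _ (by rw [shifted_length]; exact ht)] at h
  exact h

theorem shifted_eq_map (shift : Int) :
    make_shifted_alphabet shift
      = (List.range 26).map (fun (t : Nat) => Char.ofNat (65 + (((t : Int) + shift) % 26).toNat)) := by
  apply List.ext_getElem
  · simp [shifted_length]
  · intro t ht _
    rw [shifted_length] at ht
    rw [shifted_getElem shift t ht]
    simp only [List.getElem_map, List.getElem_range]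

theorem shifted_nodup (shift : Int) : (make_shifted_alphabet shift).Nodup := by
  rw [shifted_eq_map]
  refine List.Nodup.map_on ?_ (List.nodup_range)
  intro a ha b hb h
  have h1 := letter_inj _ (by simp only [List.mem_range]; omega) _
    (by simp only [List.mem_range]; omega) h
  simp only [List.mem_range] at ha hb
  omega

theorem rev_nodup (shift : Int) : (make_shifted_alphabet shift).reverse.Nodup := by
  rw [List.nodup_reverse]; exact shifted_nodup shift

-- the reversed shifted alphabet, element by element
theorem rev_getD (shift j : Int) (h0 : 0 ≤ j) (h1 : j < 26) :
    PySem.List.pyGetD (make_shifted_alphabet shift).reverse j ' '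
      = Char.ofNat (65 + ((25 - j + shift) % 26).toNat) := by
  have hlen : (make_shifted_alphabet shift).reverse.length = 26 := by
    rw [List.length_reverse, shifted_length]
  rw [show j = ((j.toNat : Nat) : Int) by omega, PySem.List.pyGetD_natCast]
  rw [List.getD_eq_getElem _ _ (by omega)]
  simp only [List.getElem_reverse, shifted_length]
  rw [shifted_getElem shift (26 - 1 - j.toNat) (by omega)]
  congr 1
  omega

-- the backward dict of A, as an items list
theorem backward_items (shift : Int) :
    (make_stage2_maps shift).2.items
      = (PySem.List.pyRange 0 26 1).map
          (fun i => (PySem.List.pyGetD (make_shifted_alphabet shift).reverse i ' ',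
                     PySem.List.pyGetD (make_shifted_alphabet shift) i ' ')) := by
  simp only [make_stage2_maps]
  have hmap : (PySem.List.pyRange 0 26 1).map
      (fun i => PySem.List.pyGetD (make_shifted_alphabet shift).reverse i ' ')
      = (make_shifted_alphabet shift).reverse := by
    have hlen : ((make_shifted_alphabet shift).reverse.length : Int) = 26 := by
      rw [List.length_reverse, shifted_length]; norm_num
    rw [show (26 : Int) = ((make_shifted_alphabet shift).reverse.length : Int) from hlen.symm]
    exact PySem.List.map_pyGetD_pyRange_zero' _ _
  rw [PySem.Dict.items_foldl_insert_fresh]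
  · rw [show (PySem.Dict.empty : PySem.Dict Char Char).items = [] from rfl, List.nil_append]
  · intro a _; exact PySem.Dict.contains_empty _
  · rw [hmap]; exact rev_nodup shift

theorem backward_keys_nodup (shift : Int) : (make_stage2_maps shift).2.keys.Nodup := by
  simp only [make_stage2_maps]
  apply PySem.Dict.nodup_keys_foldl_insert_key
  simp [PySem.Dict.keys_empty]

-- A's backward lookup of the uppercase letter of index c
theorem backward_get (shift : Int) (c : Nat) (hc : c < 26) :
    (make_stage2_maps shift).2.get? (Char.ofNat (65 + c))
      = some (Char.ofNat (65 + ((((25 + shift - c) % 26) + shift) % 26).toNat)) := by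
  refine PySem.Dict.get?_of_mem_items _ ?_ (backward_keys_nodup shift)
  rw [backward_items]
  apply List.mem_map.mpr
  refine ⟨(25 + shift - c) % 26, ?_, ?_⟩
  · rw [PySem.List.mem_pyRange_one]; omega
  · rw [rev_getD shift _ (by omega) (by omega), shifted_getD shift _ (by omega) (by omega)]
    have h : ((25 - (25 + shift - (c : Int)) % 26 + shift) % 26).toNat = c := by omega
    rw [h]

-- B's table, as an items list, and its lookup
theorem altTable_items (shift : Int) :
    (altTable shift).items
      = (PySem.List.pyRange 0 26 1).map
          (fun c => (Char.ofNat (65 + c).toNat,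
                     Char.ofNat (97 + PySem.Int.mod (25 + shift - c) 26).toNat)) := by
  unfold altTable
  rw [PySem.Dict.items_foldl_insert_fresh]
  · rw [show (PySem.Dict.empty : PySem.Dict Char Char).items = [] from rfl, List.nil_append]
  · intro a _; exact PySem.Dict.contains_empty _
  · decide

theorem altTable_keys_nodup (shift : Int) : (altTable shift).keys.Nodup := by
  unfold altTable
  apply PySem.Dict.nodup_keys_foldl_insert_key
  simp [PySem.Dict.keys_empty]

theorem altTable_get (shift : Int) (c : Nat) (hc : c < 26) :
    (altTable shift).get? (Char.ofNat (65 + c))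
      = some (Char.ofNat (97 + ((25 + shift - c) % 26).toNat)) := by
  refine PySem.Dict.get?_of_mem_items _ ?_ (altTable_keys_nodup shift)
  rw [altTable_items]
  apply List.mem_map.mpr
  refine ⟨(c : Int), ?_, ?_⟩
  · rw [PySem.List.mem_pyRange_one]; omega
  · rw [mod26_emod]
    rw [show (65 + (c : Int)).toNat = 65 + c by omega]
    rw [show (97 + (25 + shift - (c : Int)) % 26).toNat
          = 97 + ((25 + shift - (c : Int)) % 26).toNat by omega]

-- the per-character agreement on uppercase letters
theorem perchar (shift : Int) (c : Nat) (hc : c < 26) :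
    stage1Char shift (stage2Char (make_stage2_maps shift).2 (Char.ofNat (65 + c)))
      = altChar (altTable shift) (Char.ofNat (65 + c)) := by
  have hcmem : c ∈ List.range 26 := by simp only [List.mem_range]; omega
  -- A side
  rw [stage2Char, if_neg (letter_ne_space c hcmem), backward_get shift c hc, Option.getD_some]
  -- B side
  rw [altChar, if_neg (letter_ne_space c hcmem), altTable_get shift c hc, Option.getD_some]
  -- name the intermediate indices
  set i0 : Int := (25 + shift - c) % 26 with hi0
  set m : Nat := ((i0 + shift) % 26).toNat with hm
  have hmmem : m ∈ List.range 26 := by simp only [List.mem_range]; omega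
  rw [stage1Char, if_neg (letter_ne_space m hmmem)]
  simp only [lowerChar_letter m hmmem, index_letter m hmmem, Option.getD_some]
  have hidx : PySem.Int.mod ((m : Int) - shift) 26 = i0 := by rw [mod26_emod]; omega
  rw [hidx]
  rw [show i0 = ((i0.toNat : Nat) : Int) by omega, PySem.List.pyGetD_natCast]
  rw [lower_getD i0.toNat (by simp only [List.mem_range]; omega)]
  congr 1

-- every admitted character is a space or an uppercase letter
theorem mem_allowed (ch : Char) (h : (ch == ' ' || ('A' ≤ ch && ch ≤ 'Z')) = true) :
    ch = ' ' ∨ ∃ c ∈ List.range 26, ch = Char.ofNat (65 + c) := by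
  simp only [Bool.or_eq_true, beq_iff_eq, Bool.and_eq_true, decide_eq_true_eq] at h
  rcases h with h | ⟨h1, h2⟩
  · exact Or.inl h
  · rw [Char.le_def, UInt32.le_iff_toNat_le] at h1 h2
    have h1' : 65 ≤ ch.toNat := h1
    have h2' : ch.toNat ≤ 90 := h2
    right
    refine ⟨ch.toNat - 65, by simp only [List.mem_range]; omega, ?_⟩
    rw [show 65 + (ch.toNat - 65) = ch.toNat by omega, Char.ofNat_toNat]

theorem toList_ofList (l : List Char) : (String.ofList l).toList = l := by simp

-- ===== VERDICT (by name: the statement is the Claim_ definition above) =====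
theorem decrypt_double_spec : Claim_equal_decrypt_double := by
  intro ct2 shift _ hpre
  unfold Pre_decrypt_double at hpre
  rw [List.all_eq_true] at hpre
  unfold Spec_decrypt_double decrypt_double decrypt_double_alt decrypt_stage1
  simp only [toList_ofList, List.map_map]
  congr 1
  refine List.map_congr_left (fun ch hch => ?_)
  rcases mem_allowed ch (hpre ch hch) with h | ⟨c, hc, h⟩
  · subst h; simp [stage1Char, stage2Char, altChar, Function.comp]
  · subst h
    simpa using perchar shift c (by simpa [List.mem_range] using hc)
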